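-- pv_equiv track=rewrite | github.com/fabio-amadio/yahmp | src/yahmp/mdp/motion/indexing.py | build_name_to_index
-- ===== SOURCE A (Python) =====
-- def build_name_to_index(body_names: tuple[str, ...], source: str) -> dict[str, int]:
--   """Build a unique body-name to index mapping and validate duplicates."""
--   name_to_index: dict[str, int] = {}
--   duplicates: list[str] = []
--   for index, name in enumerate(body_names):
--     if name in name_to_index:
--       duplicates.append(name)
--     else:
--       name_to_index[name] = index
--   if duplicates:
--     raise ValueError(
--       f"Duplicate body names found in {source} definition: {sorted(set(duplicates))}"
--     )
--   return name_to_index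
-- ===== SOURCE B (Python) =====
-- def build_name_to_index(body_names, source):
--     """Build a unique body-name to index mapping and validate duplicates."""
--     counts: dict[str, int] = {}
--     for name in body_names:
--         counts[name] = counts.get(name, 0) + 1
--     duplicated = {name for name, c in counts.items() if c > 1}
--     if duplicated:
--         raise ValueError(
--             f"Duplicate body names found in {source} definition: {sorted(duplicated)}"
--         )
--     return {name: index for index, name in enumerate(body_names)}
-- ===== Notes on version B (the rewrite author's own statement) =====
-- stated objective: alternative
-- what changed: Replaces the single membership-checking loop that interleaves dict building with duplicate collection by a count-then-build decomposition: a frequency table is built first, duplicates are read off it, and the mapping is a separate enumerate comprehension.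
import Mathlib
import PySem

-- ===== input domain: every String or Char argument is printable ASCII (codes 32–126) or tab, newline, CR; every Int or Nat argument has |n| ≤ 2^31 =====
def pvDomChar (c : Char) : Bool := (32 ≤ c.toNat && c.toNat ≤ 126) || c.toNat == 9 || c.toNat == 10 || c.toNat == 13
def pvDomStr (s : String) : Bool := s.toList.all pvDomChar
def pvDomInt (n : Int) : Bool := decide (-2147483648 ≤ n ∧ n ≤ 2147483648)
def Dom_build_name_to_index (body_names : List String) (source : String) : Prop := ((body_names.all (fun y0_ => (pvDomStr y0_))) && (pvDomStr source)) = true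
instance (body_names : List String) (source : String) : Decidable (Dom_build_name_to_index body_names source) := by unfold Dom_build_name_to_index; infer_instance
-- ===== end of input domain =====

-- B replaces A's single membership-checking loop by a count-then-build decomposition
-- (frequency table first, then a separate enumerate comprehension); objective: alternative.
-- On duplicate names both Pythons raise ValueError; those inputs are outside Pre_.

-- ===== PORT A =====
-- one pass: membership test decides between recording a duplicate and inserting the index
def build_name_to_index (body_names : List String) (source : String) : List (String × Int) :=
  let st := (PySem.List.enumerate body_names).foldl
    (fun (s : PySem.Dict String Int × List String) p =>
      if s.1.contains p.2 then (s.1, s.2 ++ [p.2])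
      else (s.1.insert p.2 p.1, s.2))
    (PySem.Dict.empty, [])
  if st.2 ≠ [] then [] else st.1.items   -- nonempty duplicates: Python raises ValueError (outside Pre_)

-- ===== PORT B =====
-- pass 1: frequency table; then duplicates read off it; pass 2: enumerate comprehension
def build_name_to_index_alt (body_names : List String) (source : String) : List (String × Int) :=
  let counts := body_names.foldl
    (fun (d : PySem.Dict String Int) n => d.insert n (d.getD n 0 + 1)) PySem.Dict.empty
  let duplicated := PySem.Set.ofList ((counts.items.filter (fun p => 1 < p.2)).map (·.1))
  if duplicated ≠ [] then [] else   -- nonempty duplicated set: Python raises ValueError (outside Pre_)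
    (PySem.List.enumerate body_names).map (fun p => (p.2, p.1))

-- ===== PRECONDITION & SPEC =====
-- Pre_ excludes exactly the inputs with a repeated body name, on which both Pythons raise ValueError.
def Pre_build_name_to_index (body_names : List String) (source : String) : Prop :=
  body_names.Nodup
instance (body_names : List String) (source : String) : Decidable (Pre_build_name_to_index body_names source) := by unfold Pre_build_name_to_index; infer_instance

def pvWitness_build_name_to_index : List String × String := (["base", "arm", "hand"], "model")

def Spec_build_name_to_index (body_names : List String) (source : String) (out : List (String × Int)) : Prop := out = build_name_to_index_alt body_names source
instance (body_names : List String) (source : String) (out : List (String × Int)) : Decidable (Spec_build_name_to_index body_names source out) := by unfold Spec_build_name_to_index; infer_instance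

-- ===== CLAIM (what is proved, stated in full; the proofs are below) =====
def Claim_equal_build_name_to_index : Prop := ∀ (body_names : List String) (source : String), Dom_build_name_to_index body_names source → Pre_build_name_to_index body_names source → Spec_build_name_to_index body_names source (build_name_to_index body_names source)

-- ===== LEMMAS AND PROOFS =====

-- A's loop over fresh, distinct names: the dict collects (name, index) pairs in order, no duplicates recorded.
theorem pvA_loop (l : List String) (i : Int) (d : PySem.Dict String Int) (dup : List String)
    (hnd : l.Nodup) (hfresh : ∀ n ∈ l, d.contains n = false) :
    (PySem.List.enumerate l i).foldl
      (fun (s : PySem.Dict String Int × List String) p =>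
        if s.1.contains p.2 then (s.1, s.2 ++ [p.2])
        else (s.1.insert p.2 p.1, s.2)) (d, dup)
    = (⟨d.items ++ (PySem.List.enumerate l i).map (fun p => (p.2, p.1))⟩, dup) := by
  induction l generalizing i d with
  | nil => simp [PySem.List.enumerate]
  | cons x xs ih =>
    rw [PySem.List.enumerate_cons]
    simp only [List.foldl_cons]
    simp only [hfresh x (by simp), Bool.false_eq_true, if_false]
    rw [ih (i + 1) (d.insert x i) (List.Nodup.of_cons hnd)
      (by
        intro n hn
        rw [PySem.Dict.contains_insert]
        have hne : n ≠ x := fun h => (List.nodup_cons.mp hnd).1 (h ▸ hn)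
        rw [hfresh n (List.mem_cons_of_mem _ hn)]
        simp [hne])]
    rw [PySem.Dict.items_insert_of_not_contains _ _ (hfresh x (by simp))]
    simp

-- On a Nodup list every name occurs once, so B's count-table filter is empty.
theorem pvB_no_dups (l : List String) (hnd : l.Nodup) :
    ((l.foldl (fun (d : PySem.Dict String Int) n => d.insert n (d.getD n 0 + 1))
        PySem.Dict.empty).items.filter (fun p => 1 < p.2)) = [] := by
  rw [PySem.Dict.foldl_insert_getD_add_one_eq_counter, PySem.Dict.items_counter]
  rw [List.filter_map]
  rw [List.filter_eq_nil_iff.mpr]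
  · simp
  · intro k hk
    have hk' : k ∈ l := (PySem.Set.mem_ofList _ _).mp hk
    have : l.count k = 1 := List.count_eq_one_of_mem hnd hk'
    simp [Function.comp, this]

-- ===== VERDICT (by name: the statement is the Claim_ definition above) =====
theorem build_name_to_index_spec : Claim_equal_build_name_to_index := by
  intro body_names source _ hpre
  unfold Spec_build_name_to_index build_name_to_index build_name_to_index_alt
  rw [pvA_loop body_names 0 PySem.Dict.empty [] hpre (by intro n _; rfl)]
  simp only [pvB_no_dups body_names hpre, List.map_nil]
  simp [PySem.Set.ofList, PySem.Dict.empty]
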